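-- pv_equiv track=rewrite | github.com/shashanknamdeo/Python | Codevita/CodeVitaRound2/Solution.py | join_houses
-- ===== SOURCE A (Python) =====
-- def join_houses(houses):
--     """
--     Join multiple tilted houses side by side aligned at base.
--     Keeps all blank spaces (inside and outside houses).
--     """
--     max_height = max(len(h) for h in houses)
--     padded_houses = []
--     for h in houses:
--         pad_top = max_height - len(h)
--         width = len(h[0])
--         new_house = [' ' * width] * pad_top + h
--         padded_houses.append(new_house)
--
--     result = []
--     for i in range(max_height):
--         row = ''.join(padded_houses[j][i] for j in range(len(houses)))
--         result.append(row)
--     return result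
-- ===== SOURCE B (Python) =====
-- def join_houses(houses):
--     """Base-aligned join, built bottom-up: reverse each house, emit rows from
--     the base upward with per-house blank fill, then reverse the result."""
--     widths = [len(h[0]) for h in houses]
--     rev = [h[::-1] for h in houses]
--     max_height = max(len(h) for h in houses)
--     result = []
--     for i in range(max_height):
--         result.append(''.join(r[i] if i < len(r) else ' ' * w
--                               for r, w in zip(rev, widths)))
--     result.reverse()
--     return result
-- ===== Notes on version B (the rewrite author's own statement) =====
-- stated objective: alternative
-- what changed: B drops A's padded-houses intermediate table: it reverses each house once and builds the output bottom-up in a single pass over row indices, filling short houses inline with a width-sized blank, then reverses the collected rows.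
import Mathlib
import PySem

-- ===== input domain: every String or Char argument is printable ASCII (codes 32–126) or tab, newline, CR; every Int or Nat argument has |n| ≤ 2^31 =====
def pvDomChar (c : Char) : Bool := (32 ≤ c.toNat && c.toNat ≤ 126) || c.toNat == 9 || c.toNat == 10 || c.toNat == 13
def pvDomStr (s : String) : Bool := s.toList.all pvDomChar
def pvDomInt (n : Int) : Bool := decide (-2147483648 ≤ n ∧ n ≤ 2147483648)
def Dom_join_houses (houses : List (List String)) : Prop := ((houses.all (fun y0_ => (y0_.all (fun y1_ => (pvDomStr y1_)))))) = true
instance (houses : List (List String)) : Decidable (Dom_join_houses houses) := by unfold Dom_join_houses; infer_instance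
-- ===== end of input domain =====

-- B builds the picture bottom-up from reversed houses in one pass instead of
-- materializing a top-padded table and transposing it by index (objective: simpler decomposition).

-- ===== PORT A =====
-- width of a house = len(h[0]); blank filler row of that width
def pvWidthA (h : List String) : Nat := (PySem.Str.len ((PySem.List.pyGet? h 0).getD "")).toNat

def pvBlankA (h : List String) : String := String.ofList (List.replicate (pvWidthA h) ' ')

def join_houses (houses : List (List String)) : List String :=
  let maxH := (PySem.List.max? (houses.map (fun h => h.length)) id).getD 0
  let padded := houses.map (fun h => List.replicate (maxH - h.length) (pvBlankA h) ++ h)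
  (List.range maxH).map (fun i =>
    PySem.Str.join "" ((List.range houses.length).map (fun j =>
      ((padded.getD j []).getD i ""))))

-- ===== PORT B =====
def join_houses_alt (houses : List (List String)) : List String :=
  let widths := houses.map (fun h => (PySem.Str.len ((PySem.List.pyGet? h 0).getD "")).toNat)
  let rev := houses.map List.reverse
  let maxH := (PySem.List.max? (houses.map (fun h => h.length)) id).getD 0
  let rows := (List.range maxH).map (fun i =>
    PySem.Str.join "" ((rev.zip widths).map (fun rw =>
      if i < rw.1.length then rw.1.getD i "" else String.ofList (List.replicate rw.2 ' '))))
  rows.reverse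

-- ===== PRECONDITION & SPEC =====
-- Pre_ excludes exactly where Python A raises: max() on an empty houses list (ValueError)
-- and h[0] on an empty house (IndexError); B raises at the same inputs.
def Pre_join_houses (houses : List (List String)) : Prop :=
  houses ≠ [] ∧ ∀ h ∈ houses, h ≠ []
instance (houses : List (List String)) : Decidable (Pre_join_houses houses) := by
  unfold Pre_join_houses; infer_instance

def pvWitness_join_houses : List (List String) := [["***", " * "], ["###"]]

def Spec_join_houses (houses : List (List String)) (out : List String) : Prop := out = join_houses_alt houses
instance (houses : List (List String)) (out : List String) : Decidable (Spec_join_houses houses out) := by unfold Spec_join_houses; infer_instance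

-- ===== CLAIM (what is proved, stated in full; the proofs are below) =====
def Claim_equal_join_houses : Prop := ∀ (houses : List (List String)), Dom_join_houses houses → Pre_join_houses houses → Spec_join_houses houses (join_houses houses)

-- ===== LEMMAS AND PROOFS =====

-- max? over a nonempty list is some
theorem pv_max?_isSome {α κ : Type} [LT κ] [DecidableLT κ] (xs : List α) (key : α → κ)
    (h : xs ≠ []) : (PySem.List.max? xs key).isSome := by
  cases xs with
  | nil => exact absurd rfl h
  | cons x xs =>
    simp only [PySem.List.max?, List.foldl_cons]
    clear h
    induction xs generalizing x with
    | nil => rfl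
    | cons y ys ih =>
      simp only [List.foldl_cons]
      by_cases hlt : key x < key y
      · simpa [hlt] using ih y
      · simpa [hlt] using ih x

-- every house height is ≤ maxH
theorem pv_le_maxH (houses : List (List String)) (hne : houses ≠ []) (h : List String)
    (hmem : h ∈ houses) :
    h.length ≤ (PySem.List.max? (houses.map (fun h => h.length)) id).getD 0 := by
  have hs := pv_max?_isSome (houses.map (fun h => h.length)) id (by simpa using hne)
  obtain ⟨m, hm⟩ := Option.isSome_iff_exists.mp hs
  rw [hm]
  exact PySem.List.max?_isMax hm _ (List.mem_map_of_mem hmem)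

-- the per-house column value: A's padded row i agrees with B's reversed-row lookup at maxH-1-i
theorem pv_house_eq (h : List String) (b : String) (maxH i : Nat)
    (hi : i < maxH) (hlen : h.length ≤ maxH) (hpos : 1 ≤ h.length) :
    (List.replicate (maxH - h.length) b ++ h).getD i "" =
      (if maxH - 1 - i < h.reverse.length then h.reverse.getD (maxH - 1 - i) "" else b) := by
  rw [List.length_reverse]
  by_cases hcase : i < maxH - h.length
  · rw [if_neg (by omega)]
    rw [List.getD_eq_getElem _ _ (by simp; omega)]
    rw [List.getElem_append_left (by simpa using hcase)]
    simp
  · rw [if_pos (by omega)]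
    have hi1 : i - (maxH - h.length) < h.length := by omega
    rw [List.getD_eq_getElem _ _ (by simp; omega),
        List.getD_eq_getElem _ _ (by simp; omega)]
    rw [List.getElem_append_right (by simp; omega)]
    rw [List.getElem_reverse]
    congr 1
    simp
    omega

theorem join_houses_spec_aux (houses : List (List String))
    (hpre : Pre_join_houses houses) : join_houses houses = join_houses_alt houses := by
  obtain ⟨hne, hnonempty⟩ := hpre
  unfold join_houses join_houses_alt
  simp only [List.zip_map', List.map_map]
  apply List.ext_getElem
  · simp
  · intro i hA hB
    simp only [List.length_map, List.length_range] at hA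
    set maxH := (PySem.List.max? (houses.map (fun h => h.length)) id).getD 0 with hmaxH
    rw [List.getElem_reverse]
    simp only [List.getElem_map, List.getElem_range, List.length_map, List.length_range]
    congr 1
    apply List.ext_getElem
    · simp
    · intro j hj hj'
      simp only [List.length_map, List.length_range] at hj
      simp only [List.getElem_map, List.getElem_range, Function.comp]
      have hpad : (houses.map (fun h =>
          List.replicate (maxH - h.length) (pvBlankA h) ++ h)).getD j [] =
          List.replicate (maxH - houses[j].length) (pvBlankA houses[j]) ++ houses[j] := by
        rw [List.getD_eq_getElem _ _ (by simpa using hj), List.getElem_map]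
      rw [hpad]
      have hmem : houses[j] ∈ houses := List.getElem_mem _
      have := pv_house_eq houses[j] (pvBlankA houses[j]) maxH i hA
        (pv_le_maxH houses hne _ hmem)
        (List.length_pos_of_ne_nil (hnonempty _ hmem))
      simpa [pvBlankA, pvWidthA] using this

-- ===== VERDICT (by name: the statement is the Claim_ definition above) =====
theorem join_houses_spec : Claim_equal_join_houses := by
  intro houses _ hpre
  exact join_houses_spec_aux houses hpre
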